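-- pv_equiv track=rewrite | github.com/pvmm/my-pyqt-samples | prep_geocode.py | _reduz_dado
-- ===== SOURCE A (Python) =====
-- def _reduz_dado(dado):
--     '''
--     Recebe uma string e retorna uma lista com todas as possibilidades de pesquisa (string inteira e suas reduções de até 2 palavras). Ex: 'QD 400 LT B APT 201' => ['QD 400','QD 400 LT','QD 400 LT B','QD 400 LT B APT','QD 400 LT B APT 201']
--     '''
--     s = dado.replace('.', '').replace(',', ' ').split()
--     if len(s) >= 2:
--         base = s[0] + ' ' + s[1]
--         dados = [base]
--         for x in range(2,len(s)):
--             base += ' ' + s[x]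
--             dados.append( base )
--         return dados
--     else:
--         return s
-- ===== SOURCE B (Python) =====
-- def _reduz_dado(dado):
--     s = dado.replace('.', '').replace(',', ' ').split()
--     if len(s) < 2:
--         return s
--     return [' '.join(s[:k]) for k in range(2, len(s) + 1)]
-- ===== Notes on version B (the rewrite author's own statement) =====
-- stated objective: simpler
-- what changed: Replaces the accumulator loop that threads a growing prefix string through mutation with a direct comprehension that builds each prefix independently from a slice s[:k].
import Mathlib
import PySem

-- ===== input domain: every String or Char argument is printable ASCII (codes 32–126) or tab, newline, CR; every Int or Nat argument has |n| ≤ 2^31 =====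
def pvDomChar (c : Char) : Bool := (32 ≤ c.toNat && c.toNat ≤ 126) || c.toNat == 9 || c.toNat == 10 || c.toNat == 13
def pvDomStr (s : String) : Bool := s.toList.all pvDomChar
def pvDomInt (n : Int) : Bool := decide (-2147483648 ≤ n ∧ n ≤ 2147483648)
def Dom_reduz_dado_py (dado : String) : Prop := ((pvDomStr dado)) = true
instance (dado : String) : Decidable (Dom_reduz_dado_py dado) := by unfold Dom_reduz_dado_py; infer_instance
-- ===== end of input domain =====

-- B builds each prefix independently from a slice instead of threading a mutating accumulator string; same outputs.

-- ===== PORT A =====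
def reduz_dado_py (dado : String) : List String :=
  let s := PySem.Str.split₀ (PySem.Str.replace (PySem.Str.replace dado "." "") "," " ")
  if 2 ≤ s.length then
    let base := PySem.List.pyGetD s 0 "" ++ " " ++ PySem.List.pyGetD s 1 ""
    let st := (PySem.List.pyRange 2 (PySem.List.len s)).foldl
      (fun (st : String × List String) x =>
        let b := st.1 ++ " " ++ PySem.List.pyGetD s x ""
        (b, st.2 ++ [b])) (base, [base])
    st.2
  else s

-- ===== PORT B =====
def reduz_dado_py_alt (dado : String) : List String :=
  let s := PySem.Str.split₀ (PySem.Str.replace (PySem.Str.replace dado "." "") "," " ")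
  if s.length < 2 then s
  else
    (PySem.List.pyRange 2 (PySem.List.len s + 1)).map
      (fun k => PySem.Str.join " " (PySem.List.slice s none (some k)))

-- ===== PRECONDITION & SPEC =====
def Spec_reduz_dado_py (dado : String) (out : List String) : Prop := out = reduz_dado_py_alt dado
instance (dado : String) (out : List String) : Decidable (Spec_reduz_dado_py dado out) := by unfold Spec_reduz_dado_py; infer_instance

-- ===== CLAIM (what is proved, stated in full; the proofs are below) =====
def Claim_equal_reduz_dado_py : Prop := ∀ (dado : String), Dom_reduz_dado_py dado → Spec_reduz_dado_py dado (reduz_dado_py dado)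

-- ===== LEMMAS AND PROOFS =====

-- The successive prefixes A's loop builds from an initial base string.
def pvChain (base : String) : List String → List String
  | [] => []
  | w :: ws => (base ++ " " ++ w) :: pvChain (base ++ " " ++ w) ws

theorem pvFold_chain (rest : List String) (base : String) (acc : List String) :
    (rest.foldl (fun (st : String × List String) w =>
        (st.1 ++ " " ++ w, st.2 ++ [st.1 ++ " " ++ w])) (base, acc)).2
      = acc ++ pvChain base rest := by
  induction rest generalizing base acc with
  | nil => simp [pvChain]
  | cons w ws ih => simp [pvChain, List.foldl_cons, ih, List.append_assoc]

theorem pvChars_join_snoc (c y p : List Char) (xs : List (List Char)) :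
    PySem.Chars.join c ((p :: xs) ++ [y]) = PySem.Chars.join c (p :: xs) ++ c ++ y := by
  induction xs generalizing p with
  | nil => simp [PySem.Chars.join_cons_cons, PySem.Chars.join_singleton]
  | cons q t ih =>
      rw [show (p :: q :: t) ++ [y] = p :: q :: (t ++ [y]) from rfl,
        PySem.Chars.join_cons_cons c p q (t ++ [y]),
        show q :: (t ++ [y]) = (q :: t) ++ [y] from rfl, ih q,
        PySem.Chars.join_cons_cons c p q t]
      simp [List.append_assoc]

theorem pvJoin_snoc (p : String) (pre : List String) (w : String) :
    PySem.Str.join " " ((p :: pre) ++ [w]) = PySem.Str.join " " (p :: pre) ++ " " ++ w := by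
  apply String.ext
  rw [PySem.Str.toList_join]
  simp only [List.map_append, List.map_cons, List.map_nil]
  rw [pvChars_join_snoc]
  simp [PySem.Str.toList_join, String.toList_append]

theorem pvChain_join (rest : List String) (p : String) (pre : List String) :
    pvChain (PySem.Str.join " " (p :: pre)) rest
      = (List.range' (pre.length + 2) rest.length).map
          (fun k => PySem.Str.join " " (((p :: pre) ++ rest).take k)) := by
  induction rest generalizing pre with
  | nil => simp [pvChain]
  | cons w ws ih =>
      have htake : ((p :: pre) ++ w :: ws).take (pre.length + 2) = (p :: pre) ++ [w] := by
        rw [show pre.length + 2 = (p :: pre).length + 1 by simp]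
        simp [List.take_append]
      rw [List.length_cons, List.range'_succ, List.map_cons, htake, pvChain,
        show PySem.Str.join " " (p :: pre) ++ " " ++ w
            = PySem.Str.join " " (p :: (pre ++ [w])) from (pvJoin_snoc p pre w).symm,
        ih (pre ++ [w])]
      congr 1
      · congr 1
        · funext k
          congr 1
          simp
        · congr 1
          simp

theorem pvB (s : List String) :
    (PySem.List.pyRange 2 ((s.length : Int) + 1)).map
        (fun k => PySem.Str.join " " (PySem.List.slice s none (some k)))
      = (List.range' 2 (s.length - 1)).map
          (fun k => PySem.Str.join " " (s.take k)) := by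
  rw [PySem.List.pyRange_one, List.map_map, List.range'_eq_map_range, List.map_map]
  rw [show ((s.length : Int) + 1 - 2).toNat = s.length - 1 by omega]
  apply List.map_congr_left
  intro k _
  simp only [Function.comp]
  rw [show (2 : Int) + (k : Int) = ((2 + k : Nat) : Int) by push_cast; ring,
    PySem.List.slice_to_natCast]

theorem pvMain (s : List String) :
    (if 2 ≤ s.length then
       ((PySem.List.pyRange 2 (PySem.List.len s)).foldl
          (fun (st : String × List String) x =>
            (st.1 ++ " " ++ PySem.List.pyGetD s x "",
             st.2 ++ [st.1 ++ " " ++ PySem.List.pyGetD s x ""]))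
          (PySem.List.pyGetD s 0 "" ++ " " ++ PySem.List.pyGetD s 1 "",
           [PySem.List.pyGetD s 0 "" ++ " " ++ PySem.List.pyGetD s 1 ""])).2
     else s)
    = (if s.length < 2 then s
       else (PySem.List.pyRange 2 (PySem.List.len s + 1)).map
              (fun k => PySem.Str.join " " (PySem.List.slice s none (some k)))) := by
  by_cases h : 2 ≤ s.length
  · rw [if_pos h, if_neg (by omega)]
    obtain ⟨w0, w1, rest, rfl⟩ : ∃ w0 w1 rest, s = w0 :: w1 :: rest := by
      match s, h with
      | w0 :: w1 :: rest, _ => exact ⟨w0, w1, rest, rfl⟩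
    rw [PySem.List.foldl_pyRange_pyGetD (w0 :: w1 :: rest) ""
        (fun (st : String × List String) w => (st.1 ++ " " ++ w, st.2 ++ [st.1 ++ " " ++ w]))
        _ (by norm_num)]
    rw [show ((2:Int)).toNat = 2 from rfl, List.drop_succ_cons, List.drop_succ_cons, List.drop_zero,
        pvFold_chain]
    have hget0 : PySem.List.pyGetD (w0 :: w1 :: rest) 0 "" = w0 :=
      PySem.List.pyGetD_zero_cons w0 (w1 :: rest) ""
    have hget1 : PySem.List.pyGetD (w0 :: w1 :: rest) 1 "" = w1 := by
      rw [PySem.List.pyGetD_ofNat' _ 1]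
      rfl
    have hbase : w0 ++ " " ++ w1 = PySem.Str.join " " (w0 :: [w1]) := by
      apply String.ext
      simp [PySem.Str.toList_join, PySem.Chars.join_cons_cons, PySem.Chars.join_singleton,
        String.toList_append]
    have hlen : PySem.List.len (w0 :: w1 :: rest) = ((w0 :: w1 :: rest).length : Int) := by
      simp [PySem.List.len]
    rw [hget0, hget1, hbase, pvChain_join rest w0 [w1], hlen, pvB,
      show (w0 :: w1 :: rest).length - 1 = rest.length + 1 by simp,
      List.range'_succ, List.map_cons]
    simp
  · rw [if_neg h, if_pos (by omega)]

-- ===== VERDICT (by name: the statement is the Claim_ definition above) =====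
theorem reduz_dado_py_spec : Claim_equal_reduz_dado_py := by
  intro dado _
  show reduz_dado_py dado = reduz_dado_py_alt dado
  simp only [reduz_dado_py, reduz_dado_py_alt]
  exact pvMain _
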